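-- pv_equiv track=rewrite | github.com/H0LYGL0R/discrete_mathematics | main.py | check_linearity
-- ===== SOURCE A (Python) =====
-- def check_linearity(graph) -> bool:
--     vertices = list(set(v for edge in graph for v in edge))
--     edge_set = set(graph)
--
--     for i in range(len(vertices)):
--         for j in range(i + 1, len(vertices)):
--             first_value, second_value = vertices[i], vertices[j]
--             if (first_value, second_value) not in edge_set and (second_value, first_value) not in edge_set:
--                 return False
--     return True
-- ===== SOURCE B (Python) =====
-- def check_linearity(graph) -> bool:
--     vertices = set()
--     edges = set()
--     for a, b in graph:
--         vertices.add(a)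
--         vertices.add(b)
--         if a != b:
--             edges.add((a, b) if a < b else (b, a))
--     n = len(vertices)
--     return len(edges) == n * (n - 1) // 2
-- ===== Notes on version B (the rewrite author's own statement) =====
-- stated objective: faster
-- what changed: Replaces A's all-pairs double scan over the vertex list with a single pass that counts distinct undirected non-loop edges and compares against the complete-graph edge count n*(n-1)//2.
import Mathlib
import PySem

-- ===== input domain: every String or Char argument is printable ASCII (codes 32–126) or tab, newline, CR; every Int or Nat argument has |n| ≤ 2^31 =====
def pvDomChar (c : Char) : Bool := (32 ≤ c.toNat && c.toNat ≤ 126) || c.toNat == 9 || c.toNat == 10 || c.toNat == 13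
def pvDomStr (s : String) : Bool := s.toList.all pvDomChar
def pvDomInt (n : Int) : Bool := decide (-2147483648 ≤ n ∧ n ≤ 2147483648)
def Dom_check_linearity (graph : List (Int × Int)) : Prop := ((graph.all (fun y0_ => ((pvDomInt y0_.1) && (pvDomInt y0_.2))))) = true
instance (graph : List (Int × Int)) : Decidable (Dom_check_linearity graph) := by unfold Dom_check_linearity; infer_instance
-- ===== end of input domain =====

-- B replaces A's all-pairs scan with a one-pass count of distinct undirected non-loop
-- edges compared against n*(n-1)//2; proved to return the same Bool on every input.


-- ===== PORT A =====
def check_linearity (graph : List (Int × Int)) : Bool :=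
  let vertices : PySem.Set Int := PySem.Set.ofList (graph.flatMap fun e => [e.1, e.2])
  let edge_set : PySem.Set (Int × Int) := PySem.Set.ofList graph
  (PySem.List.pyRange 0 vertices.length 1).all fun i =>
    (PySem.List.pyRange (i + 1) vertices.length 1).all fun j =>
      let first_value := PySem.List.pyGetD vertices i 0
      let second_value := PySem.List.pyGetD vertices j 0
      PySem.Set.contains edge_set (first_value, second_value) ||
        PySem.Set.contains edge_set (second_value, first_value)

-- ===== PORT B =====
def check_linearity_alt (graph : List (Int × Int)) : Bool :=
  let st := graph.foldl
    (fun (st : PySem.Set Int × PySem.Set (Int × Int)) e =>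
      (PySem.Set.add (PySem.Set.add st.1 e.1) e.2,
       if e.1 ≠ e.2 then
         PySem.Set.add st.2 (if e.1 < e.2 then (e.1, e.2) else (e.2, e.1))
       else st.2))
    (PySem.Set.empty, PySem.Set.empty)
  let n := st.1.length
  st.2.length == n * (n - 1) / 2

-- ===== PRECONDITION & SPEC =====
def Spec_check_linearity (graph : List (Int × Int)) (out : Bool) : Prop := out = check_linearity_alt graph
instance (graph : List (Int × Int)) (out : Bool) : Decidable (Spec_check_linearity graph out) := by unfold Spec_check_linearity; infer_instance

-- ===== CLAIM (what is proved, stated in full; the proofs are below) =====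
def Claim_equal_check_linearity : Prop := ∀ (graph : List (Int × Int)), Dom_check_linearity graph → Spec_check_linearity graph (check_linearity graph)

-- ===== LEMMAS AND PROOFS =====

-- the vertex set, as both programs compute it
def pvVerts (graph : List (Int × Int)) : PySem.Set Int :=
  PySem.Set.ofList (graph.flatMap fun e => [e.1, e.2])

-- an edge normalised to (smaller, larger)
def pvNorm (e : Int × Int) : Int × Int := if e.1 < e.2 then (e.1, e.2) else (e.2, e.1)

-- the distinct undirected non-loop edges, as B accumulates them
def pvEdges (graph : List (Int × Int)) : PySem.Set (Int × Int) :=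
  PySem.Set.ofList (graph.filterMap fun e => if e.1 = e.2 then none else some (pvNorm e))

-- the normalised pairs of distinct elements of a vertex list
def pvPairs : List Int → List (Int × Int)
  | [] => []
  | v :: vs => (vs.map fun u => if v < u then (v, u) else (u, v)) ++ pvPairs vs

-- "the pair {x, y} is covered by some edge of the graph"
def pvCov (graph : List (Int × Int)) (x y : Int) : Prop :=
  (x, y) ∈ graph ∨ (y, x) ∈ graph

theorem pvVertsFold (graph : List (Int × Int)) (s : PySem.Set Int) :
    graph.foldl (fun s e => PySem.Set.add (PySem.Set.add s e.1) e.2) s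
      = (graph.flatMap fun e => [e.1, e.2]).foldl PySem.Set.add s := by
  induction graph generalizing s with
  | nil => rfl
  | cons e t ih => simp [List.foldl, ih]

theorem pvEdgesFold (graph : List (Int × Int)) (s : PySem.Set (Int × Int)) :
    graph.foldl (fun s e => if e.1 = e.2 then s else PySem.Set.add s (if e.1 < e.2 then (e.1, e.2) else (e.2, e.1))) s
      = (graph.filterMap fun e => if e.1 = e.2 then none else some (if e.1 < e.2 then (e.1, e.2) else (e.2, e.1))).foldl PySem.Set.add s := by
  induction graph generalizing s with
  | nil => rfl
  | cons e t ih => by_cases h : e.1 = e.2 <;> simp [List.foldl, h, ih]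

-- B computes |pvEdges| == n(n-1)/2 for n = |pvVerts|
theorem pvAltEq (graph : List (Int × Int)) :
    check_linearity_alt graph =
      ((pvEdges graph).length == (pvVerts graph).length * ((pvVerts graph).length - 1) / 2) := by
  have h := PySem.List.foldl_prod_mk
    (fun (s : PySem.Set Int) (e : Int × Int) => PySem.Set.add (PySem.Set.add s e.1) e.2)
    (fun (s : PySem.Set (Int × Int)) (e : Int × Int) =>
      if e.1 ≠ e.2 then PySem.Set.add s (if e.1 < e.2 then (e.1, e.2) else (e.2, e.1)) else s)
    graph PySem.Set.empty PySem.Set.empty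
  simp only [ne_eq, ite_not] at h
  simp only [check_linearity_alt, ne_eq, ite_not, h]
  rw [pvVertsFold, pvEdgesFold]
  simp [pvEdges, pvVerts, PySem.Set.ofList_eq_foldl, PySem.Set.empty, pvNorm]

theorem pvMemVerts (graph : List (Int × Int)) (x : Int) :
    x ∈ pvVerts graph ↔ ∃ e ∈ graph, x = e.1 ∨ x = e.2 := by
  unfold pvVerts
  rw [PySem.Set.mem_ofList]
  simp [List.mem_flatMap]

theorem pvMemEdges (graph : List (Int × Int)) (x y : Int) (hxy : x < y) :
    (x, y) ∈ pvEdges graph ↔ pvCov graph x y := by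
  unfold pvEdges pvCov
  rw [PySem.Set.mem_ofList]
  simp only [List.mem_filterMap]
  constructor
  · rintro ⟨⟨a, b⟩, he, hn⟩
    by_cases h : a = b
    · simp [h] at hn
    · simp only [h, if_false, Option.some.injEq, pvNorm] at hn
      split_ifs at hn with hlt <;> simp at hn <;>
        [ (left; rw [hn.1, hn.2] at he; exact he);
          (right; rw [hn.1, hn.2] at he; exact he) ]
  · rintro (h | h)
    · exact ⟨(x, y), h, by simp [pvNorm, hxy]; omega⟩
    · exact ⟨(y, x), h, by simp [pvNorm]; omega⟩

theorem pvEdgeLt (graph : List (Int × Int)) (p : Int × Int) (hp : p ∈ pvEdges graph) :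
    p.1 < p.2 ∧ p.1 ∈ pvVerts graph ∧ p.2 ∈ pvVerts graph := by
  unfold pvEdges at hp
  rw [PySem.Set.mem_ofList] at hp
  simp only [List.mem_filterMap] at hp
  obtain ⟨e, he, hn⟩ := hp
  by_cases h : e.1 = e.2
  · simp [h] at hn
  · simp only [h, if_false, Option.some.injEq, pvNorm] at hn
    rw [pvMemVerts, pvMemVerts]
    split_ifs at hn with hlt <;> rw [← hn] <;>
      exact ⟨by omega, ⟨e, he, by simp⟩, ⟨e, he, by simp⟩⟩

theorem pvMemPairs (V : List Int) (hnd : V.Nodup) (p : Int × Int) :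
    p ∈ pvPairs V ↔ p.1 < p.2 ∧ p.1 ∈ V ∧ p.2 ∈ V := by
  induction V with
  | nil => simp [pvPairs]
  | cons v vs ih =>
    have hv : v ∉ vs := (List.nodup_cons.mp hnd).1
    have ih := ih (List.nodup_cons.mp hnd).2
    obtain ⟨x, y⟩ := p
    simp only [pvPairs, List.mem_append, List.mem_map, ih, List.mem_cons]
    constructor
    · rintro (⟨u, hu, he⟩ | ⟨h1, h2, h3⟩)
      · have huv : u ≠ v := fun h => hv (h ▸ hu)
        split_ifs at he with hlt
        · simp at he; obtain ⟨h1, h2⟩ := he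
          exact ⟨by omega, Or.inl h1.symm, Or.inr (h2 ▸ hu)⟩
        · simp at he; obtain ⟨h1, h2⟩ := he
          exact ⟨by omega, Or.inr (h1 ▸ hu), Or.inl h2.symm⟩
      · exact ⟨h1, Or.inr h2, Or.inr h3⟩
    · rintro ⟨hlt, (h1 | h1), (h2 | h2)⟩
      · exact absurd hlt (by omega)
      · left; exact ⟨y, h2, by rw [← h1]; simp [hlt]⟩
      · left; exact ⟨x, h1, by rw [← h2]; simp [show ¬ y < x by omega]⟩
      · exact Or.inr ⟨hlt, h1, h2⟩

theorem pvPairsNodup (V : List Int) (hnd : V.Nodup) : (pvPairs V).Nodup := by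
  induction V with
  | nil => simp [pvPairs]
  | cons v vs ih =>
    have hv : v ∉ vs := (List.nodup_cons.mp hnd).1
    have hnd' := (List.nodup_cons.mp hnd).2
    simp only [pvPairs]
    refine List.Nodup.append ?_ (ih hnd') ?_
    · refine List.Nodup.map_on ?_ hnd'
      intro a ha b hb he
      split_ifs at he <;> simp at he <;> omega
    · intro p hp hq
      rw [pvMemPairs vs hnd' p] at hq
      simp only [List.mem_map] at hp
      obtain ⟨u, hu, he⟩ := hp
      split_ifs at he <;> rw [← he] at hq <;> simp at hq <;> exact hv (by tauto)

theorem pvPairsLen (V : List Int) : 2 * (pvPairs V).length = V.length * (V.length - 1) := by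
  induction V with
  | nil => simp [pvPairs]
  | cons v vs ih =>
    simp only [pvPairs, List.length_append, List.length_map, List.length_cons]
    cases vs with
    | nil => simp [pvPairs]
    | cons w ws =>
      simp only [List.length_cons, Nat.add_sub_cancel] at ih ⊢
      nlinarith [ih]

-- the double index loop of A, as a statement about index pairs
theorem pvAllPairs (V : List Int) (f : Int → Int → Bool) :
    (((PySem.List.pyRange 0 (V.length) 1).all fun i =>
      (PySem.List.pyRange (i + 1) (V.length) 1).all fun j =>
        f (PySem.List.pyGetD V i 0) (PySem.List.pyGetD V j 0)) = true)
    ↔ ∀ (a b : Nat) (_ : a < b) (hb : b < V.length), f V[a] V[b] = true := by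
  simp only [List.all_eq_true, PySem.List.mem_pyRange_one]
  constructor
  · intro H a b hab hb
    have H2 := H (a : Int) ⟨by omega, by omega⟩ (b : Int) ⟨by omega, by omega⟩
    rw [PySem.List.pyGetD_eq_getElem _ _ (by omega) (by omega),
        PySem.List.pyGetD_eq_getElem _ _ (by omega) (by omega)] at H2
    simpa using H2
  · intro H i hi j hj
    rw [PySem.List.pyGetD_eq_getElem _ _ (by omega) (by omega),
        PySem.List.pyGetD_eq_getElem _ _ (by omega) (by omega)]
    exact H i.toNat j.toNat (by omega) (by omega)

-- index pairs versus normalised element pairs, for a symmetric condition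
theorem pvIdxPairs (V : List Int) (hnd : V.Nodup) (C : Int → Int → Prop)
    (hsym : ∀ x y, C x y → C y x) :
    (∀ (a b : Nat) (_ : a < b) (hb : b < V.length), C V[a] V[b])
      ↔ ∀ p ∈ pvPairs V, C p.1 p.2 := by
  constructor
  · intro H p hp
    obtain ⟨hlt, h1, h2⟩ := (pvMemPairs V hnd p).mp hp
    obtain ⟨a, ha, hVa⟩ := List.mem_iff_getElem.mp h1
    obtain ⟨b, hb, hVb⟩ := List.mem_iff_getElem.mp h2
    rcases lt_trichotomy a b with h | h | h
    · have := H a b h hb; rw [hVa, hVb] at this; exact this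
    · exfalso; subst h; omega
    · have := H b a h ha; rw [hVa, hVb] at this; exact hsym _ _ this
  · intro H a b hab hb
    have ha : a < V.length := by omega
    have hne : V[a] ≠ V[b] := by
      intro h; exact absurd (List.Nodup.getElem_inj_iff hnd |>.mp h) (by omega)
    rcases lt_or_gt_of_ne hne with h | h
    · exact H (V[a], V[b]) ((pvMemPairs V hnd _).mpr
        ⟨h, List.getElem_mem ha, List.getElem_mem hb⟩)
    · exact hsym _ _ (H (V[b], V[a]) ((pvMemPairs V hnd _).mpr
        ⟨h, List.getElem_mem hb, List.getElem_mem ha⟩))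

-- A is True exactly when every normalised vertex pair is covered
theorem pvAEq (graph : List (Int × Int)) :
    check_linearity graph = true ↔
      ∀ p ∈ pvPairs (pvVerts graph), pvCov graph p.1 p.2 := by
  unfold check_linearity
  rw [show PySem.Set.ofList (graph.flatMap fun e => [e.1, e.2]) = pvVerts graph from rfl]
  rw [pvAllPairs (pvVerts graph)
    (fun x y => PySem.Set.contains (PySem.Set.ofList graph) (x, y) ||
                PySem.Set.contains (PySem.Set.ofList graph) (y, x))]
  rw [pvIdxPairs (pvVerts graph) (PySem.Set.nodup_ofList _)
    (fun x y => (PySem.Set.contains (PySem.Set.ofList graph) (x, y) ||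
                 PySem.Set.contains (PySem.Set.ofList graph) (y, x)) = true)
    (by intro x y h; simp only [Bool.or_eq_true] at *; tauto)]
  refine forall₂_congr fun p hp => ?_
  simp [pvCov, PySem.Set.mem_ofList]

theorem pvMainIff (graph : List (Int × Int)) :
    check_linearity graph = check_linearity_alt graph := by
  have hndV : (pvVerts graph).Nodup := PySem.Set.nodup_ofList _
  have hndE : (pvEdges graph).Nodup := PySem.Set.nodup_ofList _
  have hndP : (pvPairs (pvVerts graph)).Nodup := pvPairsNodup _ hndV
  have hEP : pvEdges graph ⊆ pvPairs (pvVerts graph) := by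
    intro p hp
    obtain ⟨h1, h2, h3⟩ := pvEdgeLt graph p hp
    exact (pvMemPairs _ hndV p).mpr ⟨h1, h2, h3⟩
  have hLen : (pvPairs (pvVerts graph)).length
      = (pvVerts graph).length * ((pvVerts graph).length - 1) / 2 := by
    have := pvPairsLen (pvVerts graph); omega
  rw [pvAltEq]
  by_cases hA : check_linearity graph = true
  · rw [hA]
    have hPE : ∀ p ∈ pvPairs (pvVerts graph), p ∈ pvEdges graph := by
      intro p hp
      obtain ⟨h1, _, _⟩ := (pvMemPairs _ hndV p).mp hp
      exact (pvMemEdges graph p.1 p.2 h1).mpr (pvAEq graph |>.mp hA p hp)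
    have hperm : (pvEdges graph).Perm (pvPairs (pvVerts graph)) :=
      (List.perm_ext_iff_of_nodup hndE hndP).mpr fun p => ⟨fun h => hEP h, fun h => hPE p h⟩
    rw [← hLen, hperm.length_eq]
    exact (beq_self_eq_true _).symm
  · rw [Bool.not_eq_true] at hA
    rw [hA]
    obtain ⟨p, hp, hpe⟩ : ∃ p ∈ pvPairs (pvVerts graph), p ∉ pvEdges graph := by
      by_contra hc
      push Not at hc
      exact absurd ((pvAEq graph).mpr fun p hp =>
        (pvMemEdges graph p.1 p.2 ((pvMemPairs _ hndV p).mp hp).1).mp (hc p hp))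
        (by simp [hA])
    have hsub : pvEdges graph ⊆ (pvPairs (pvVerts graph)).erase p := by
      intro q hq
      refine (List.mem_erase_of_ne ?_).mpr (hEP hq)
      rintro rfl; exact hpe hq
    have hlt : (pvEdges graph).length < (pvPairs (pvVerts graph)).length := by
      have h1 := (hndE.subperm hsub).length_le
      have h2 := (pvPairs (pvVerts graph)).length_erase_of_mem hp
      have h3 : 1 ≤ (pvPairs (pvVerts graph)).length := List.length_pos_of_mem hp
      omega
    rw [← hLen]
    symm
    rw [beq_eq_false_iff_ne]
    omega

-- ===== VERDICT (by name: the statement is the Claim_ definition above) =====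
theorem check_linearity_spec : Claim_equal_check_linearity := by
  intro graph _
  unfold Spec_check_linearity
  exact pvMainIff graph
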